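-- pv_equiv track=rewrite | github.com/pepperonas/navee-st3-pro | tools/bldc_compare.py | find_speed_candidates
-- ===== SOURCE A (Python) =====
-- def find_speed_candidates(data, label):
--     """Suche nach Speed-relevanten Mustern."""
--     results = []
--
--     # 1. Byte 0x16 (22 km/h) in Config-Kontexten
--     for i in range(2, len(data) - 2):
--         if data[i] == 0x16:  # 22
--             neighbors = data[max(0, i - 4):i + 5]
--             if all(b < 100 for b in neighbors):
--                 results.append(("byte_22", i, neighbors))
--
--     # 2. Byte 0x19 (25 km/h)
--     for i in range(2, len(data) - 2):
--         if data[i] == 0x19:  # 25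
--             neighbors = data[max(0, i - 4):i + 5]
--             if all(b < 100 for b in neighbors):
--                 results.append(("byte_25", i, neighbors))
--
--     # 3. Aufsteigende Speed-Tabellen
--     for i in range(len(data) - 6):
--         window = list(data[i:i + 6])
--         if all(10 <= v <= 70 for v in window) and window == sorted(window) and len(set(window)) >= 4:
--             results.append(("speed_table", i, data[i:i + 8]))
--
--     # 4. Word-Werte: 2200 (22.0 km/h * 100), 2500
--     for i in range(len(data) - 1):
--         val_le = data[i] | (data[i + 1] << 8)
--         val_be = (data[i] << 8) | data[i + 1]
--         for val, src in [(val_le, "LE"), (val_be, "BE")]: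
--             if val in (2200, 2500, 3200, 4000, 5000, 2000):
--                 results.append((f"word_{val}_{src}", i, data[max(0, i - 2):i + 4]))
--
--     return results
-- ===== SOURCE B (Python) =====
-- def find_speed_candidates(data, label):
--     """Index positions by value first; detect sorted windows via a run-length DP."""
--     n = len(data)
--     results = []
--
--     # positions of every value, built once in a single indexing pass
--     pos = {}
--     for i, v in enumerate(data):
--         pos[v] = pos.get(v, []) + [i]
--
--     # 1./2. the 0x16 / 0x19 byte patterns: visit only the hit positions
--     for name, val in (("byte_22", 0x16), ("byte_25", 0x19)):
--         for i in pos.get(val, []):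
--             if 2 <= i < n - 2:
--                 neighbors = data[max(0, i - 4):i + 5]
--                 if all(b < 100 for b in neighbors):
--                     results.append((name, i, neighbors))
--
--     # 3. asc[i] = length of the maximal nondecreasing run starting at i (backward DP);
--     #    a 6-window is sorted iff asc[i] >= 6, and then only its endpoints bound the range
--     asc = []
--     run = 0
--     for i in reversed(range(n)):
--         run = run + 1 if i + 1 < n and data[i] <= data[i + 1] else 1
--         asc.append(run)
--     asc.reverse()
--     for i in range(n - 6):
--         w = data[i:i + 6]
--         if asc[i] >= 6 and 10 <= w[0] and w[5] <= 70 and len(set(w)) >= 4: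
--             results.append(("speed_table", i, data[i:i + 8]))
--
--     # 4. word values
--     for i in range(n - 1):
--         lo, hi = data[i], data[i + 1]
--         for val, src in ((lo | (hi << 8), "LE"), ((lo << 8) | hi, "BE")):
--             if val in (2200, 2500, 3200, 4000, 5000, 2000):
--                 results.append(("word_%d_%s" % (val, src), i, data[max(0, i - 2):i + 4]))
--
--     return results
-- ===== Notes on version B (the rewrite author's own statement) =====
-- stated objective: alternative
-- what changed: B first builds a value-to-positions index in one pass and visits only the 0x16/0x19 hit positions (instead of rescanning all indices twice), detects sorted 6-windows with a backward run-length DP array (asc[i] = nondecreasing-run length starting at i, window sorted iff asc[i] >= 6, then only the window's endpoints bound the 10..70 range) instead of sorting every window, and keeps the word scan as a single remaining pass.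
import Mathlib
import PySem

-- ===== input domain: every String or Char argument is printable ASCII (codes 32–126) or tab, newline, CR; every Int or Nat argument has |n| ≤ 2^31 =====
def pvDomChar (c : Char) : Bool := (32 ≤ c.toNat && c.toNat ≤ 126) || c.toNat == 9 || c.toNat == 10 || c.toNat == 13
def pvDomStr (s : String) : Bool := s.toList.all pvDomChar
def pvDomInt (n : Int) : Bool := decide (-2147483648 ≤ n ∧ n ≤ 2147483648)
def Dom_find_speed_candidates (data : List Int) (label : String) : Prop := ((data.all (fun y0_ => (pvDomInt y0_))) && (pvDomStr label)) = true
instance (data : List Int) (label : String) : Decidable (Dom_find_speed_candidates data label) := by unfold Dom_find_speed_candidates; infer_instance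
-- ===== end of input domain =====

-- B builds a value→positions index once and visits only the 0x16/0x19 hit positions, and
-- detects sorted 6-windows with a backward run-length DP array instead of sorting each window.

-- ===== PORT A =====
-- indexing inside the loops is always in range (the loop bounds guarantee it), so pyGetD is exact
def find_speed_candidates (data : List Int) (label : String) : List (String × Int × List Int) :=
  let n : Int := data.length
  -- 1. byte 0x16
  let r1 := (PySem.List.pyRange 2 (n - 2) 1).foldl (fun acc i =>
      if PySem.List.pyGetD data i 0 = 22 then
        let neighbors := PySem.List.slice data (some (max 0 (i - 4))) (some (i + 5))
        if neighbors.all (fun b => decide (b < 100)) then acc ++ [("byte_22", i, neighbors)]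
        else acc
      else acc) []
  -- 2. byte 0x19
  let r2 := (PySem.List.pyRange 2 (n - 2) 1).foldl (fun acc i =>
      if PySem.List.pyGetD data i 0 = 25 then
        let neighbors := PySem.List.slice data (some (max 0 (i - 4))) (some (i + 5))
        if neighbors.all (fun b => decide (b < 100)) then acc ++ [("byte_25", i, neighbors)]
        else acc
      else acc) r1
  -- 3. ascending speed tables
  let r3 := (PySem.List.pyRange 0 (n - 6) 1).foldl (fun acc i =>
      let window := PySem.List.slice data (some i) (some (i + 6))
      if (window.all fun v => decide (10 ≤ v ∧ v ≤ 70)) &&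
         decide (window = PySem.List.sorted window id) &&
         decide (4 ≤ (PySem.Set.ofList window : List Int).length) then
        acc ++ [("speed_table", i, PySem.List.slice data (some i) (some (i + 8)))]
      else acc) r2
  -- 4. word values
  let r4 := (PySem.List.pyRange 0 (n - 1) 1).foldl (fun acc i =>
      let val_le := PySem.Int.bor (PySem.List.pyGetD data i 0) (PySem.List.pyGetD data (i + 1) 0 <<< (8 : Nat))
      let val_be := PySem.Int.bor (PySem.List.pyGetD data i 0 <<< (8 : Nat)) (PySem.List.pyGetD data (i + 1) 0)
      [(val_le, "LE"), (val_be, "BE")].foldl (fun acc2 p =>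
        if p.1 ∈ ([2200, 2500, 3200, 4000, 5000, 2000] : List Int) then
          acc2 ++ [("word_" ++ PySem.Int.toStr p.1 ++ "_" ++ p.2, i,
                    PySem.List.slice data (some (max 0 (i - 2))) (some (i + 4)))]
        else acc2) acc) r3
  r4

-- ===== PORT B =====
-- indexing inside the loops is always in range (positions come from enumerate; the guards
-- bound the rest), so pyGetD is exact
def find_speed_candidates_alt (data : List Int) (label : String) : List (String × Int × List Int) :=
  let n : Int := data.length
  -- value → list of positions, built once
  let pos := (PySem.List.enumerate data).foldl
      (fun (d : PySem.Dict Int (List Int)) p => d.modify p.2 [] (· ++ [p.1])) PySem.Dict.empty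
  -- 1./2. visit only the hit positions of 0x16 / 0x19
  let r1 := ([("byte_22", (22 : Int)), ("byte_25", (25 : Int))]).foldl (fun acc pr =>
      (pos.getD pr.2 []).foldl (fun acc i =>
        if 2 ≤ i ∧ i < n - 2 then
          let neighbors := PySem.List.slice data (some (max 0 (i - 4))) (some (i + 5))
          if neighbors.all (fun b => decide (b < 100)) then acc ++ [(pr.1, i, neighbors)]
          else acc
        else acc) acc) []
  -- 3. backward run-length DP: asc[i] = length of the maximal nondecreasing run starting at i
  let asc := (((PySem.List.pyRange 0 n 1).reverse).foldl
      (fun (st : List Int × Int) i =>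
        let run := if i + 1 < n ∧ PySem.List.pyGetD data i 0 ≤ PySem.List.pyGetD data (i + 1) 0
                   then st.2 + 1 else 1
        (st.1 ++ [run], run)) ([], 0)).1.reverse
  let r2 := (PySem.List.pyRange 0 (n - 6) 1).foldl (fun acc i =>
      let w := PySem.List.slice data (some i) (some (i + 6))
      if 6 ≤ PySem.List.pyGetD asc i 0 ∧ 10 ≤ PySem.List.pyGetD w 0 0 ∧
         PySem.List.pyGetD w 5 0 ≤ 70 ∧ 4 ≤ (PySem.Set.ofList w : List Int).length then
        acc ++ [("speed_table", i, PySem.List.slice data (some i) (some (i + 8)))]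
      else acc) r1
  -- 4. word values
  let r3 := (PySem.List.pyRange 0 (n - 1) 1).foldl (fun acc i =>
      let lo := PySem.List.pyGetD data i 0
      let hi := PySem.List.pyGetD data (i + 1) 0
      [(PySem.Int.bor lo (hi <<< (8 : Nat)), "LE"), (PySem.Int.bor (lo <<< (8 : Nat)) hi, "BE")].foldl
        (fun acc2 p =>
          if p.1 ∈ ([2200, 2500, 3200, 4000, 5000, 2000] : List Int) then
            acc2 ++ [("word_" ++ PySem.Int.toStr p.1 ++ "_" ++ p.2, i,
                      PySem.List.slice data (some (max 0 (i - 2))) (some (i + 4)))]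
          else acc2) acc) r2
  r3

-- ===== PRECONDITION & SPEC =====
def Spec_find_speed_candidates (data : List Int) (label : String) (out : List (String × Int × List Int)) : Prop := out = find_speed_candidates_alt data label
instance (data : List Int) (label : String) (out : List (String × Int × List Int)) : Decidable (Spec_find_speed_candidates data label out) := by unfold Spec_find_speed_candidates; infer_instance

-- ===== CLAIM (what is proved, stated in full; the proofs are below) =====
def Claim_equal_find_speed_candidates : Prop := ∀ (data : List Int) (label : String), Dom_find_speed_candidates data label → Spec_find_speed_candidates data label (find_speed_candidates data label)

-- ===== LEMMAS AND PROOFS =====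

-- per-index emissions of A's four loops (written with the ports' exact subterms)
def gB22 (data : List Int) (i : Int) : List (String × Int × List Int) :=
  if PySem.List.pyGetD data i 0 = 22 ∧
     ((PySem.List.slice data (some (max 0 (i - 4))) (some (i + 5))).all fun b => decide (b < 100)) = true then
    [("byte_22", i, PySem.List.slice data (some (max 0 (i - 4))) (some (i + 5)))] else []
def gB25 (data : List Int) (i : Int) : List (String × Int × List Int) :=
  if PySem.List.pyGetD data i 0 = 25 ∧
     ((PySem.List.slice data (some (max 0 (i - 4))) (some (i + 5))).all fun b => decide (b < 100)) = true then
    [("byte_25", i, PySem.List.slice data (some (max 0 (i - 4))) (some (i + 5)))] else []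
def gTab (data : List Int) (i : Int) : List (String × Int × List Int) :=
  if (((PySem.List.slice data (some i) (some (i + 6))).all fun v => decide (10 ≤ v ∧ v ≤ 70)) &&
      decide (PySem.List.slice data (some i) (some (i + 6)) =
              PySem.List.sorted (PySem.List.slice data (some i) (some (i + 6))) id) &&
      decide (4 ≤ (PySem.Set.ofList (PySem.List.slice data (some i) (some (i + 6))) : List Int).length)) = true then
    [("speed_table", i, PySem.List.slice data (some i) (some (i + 8)))] else []
def gWord (data : List Int) (i : Int) : List (String × Int × List Int) :=
  (if PySem.Int.bor (PySem.List.pyGetD data i 0) (PySem.List.pyGetD data (i + 1) 0 <<< (8 : Nat)) ∈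
      ([2200, 2500, 3200, 4000, 5000, 2000] : List Int) then
    [("word_" ++ PySem.Int.toStr (PySem.Int.bor (PySem.List.pyGetD data i 0) (PySem.List.pyGetD data (i + 1) 0 <<< (8 : Nat))) ++ "_LE", i,
      PySem.List.slice data (some (max 0 (i - 2))) (some (i + 4)))] else []) ++
  (if PySem.Int.bor (PySem.List.pyGetD data i 0 <<< (8 : Nat)) (PySem.List.pyGetD data (i + 1) 0) ∈
      ([2200, 2500, 3200, 4000, 5000, 2000] : List Int) then
    [("word_" ++ PySem.Int.toStr (PySem.Int.bor (PySem.List.pyGetD data i 0 <<< (8 : Nat)) (PySem.List.pyGetD data (i + 1) 0)) ++ "_BE", i,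
      PySem.List.slice data (some (max 0 (i - 2))) (some (i + 4)))] else [])

-- per-position emissions of B's loops
def hByte (data : List Int) (n : Int) (name : String) (i : Int) : List (String × Int × List Int) :=
  if (2 ≤ i ∧ i < n - 2) ∧
     ((PySem.List.slice data (some (max 0 (i - 4))) (some (i + 5))).all fun b => decide (b < 100)) = true then
    [(name, i, PySem.List.slice data (some (max 0 (i - 4))) (some (i + 5)))] else []
def hTab (data : List Int) (a : List Int) (i : Int) : List (String × Int × List Int) :=
  if 6 ≤ PySem.List.pyGetD a i 0 ∧
     10 ≤ PySem.List.pyGetD (PySem.List.slice data (some i) (some (i + 6))) 0 0 ∧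
     PySem.List.pyGetD (PySem.List.slice data (some i) (some (i + 6))) 5 0 ≤ 70 ∧
     4 ≤ (PySem.Set.ofList (PySem.List.slice data (some i) (some (i + 6))) : List Int).length then
    [("speed_table", i, PySem.List.slice data (some i) (some (i + 8)))] else []

-- the run-length values B's backward pass computes
def ascSpec (data : List Int) (k : Nat) : Int :=
  if h : (k : Int) + 1 < (data.length : Int) ∧
         PySem.List.pyGetD data (k : Int) 0 ≤ PySem.List.pyGetD data ((k : Int) + 1) 0
  then ascSpec data (k + 1) + 1 else 1
termination_by data.length - k
decreasing_by obtain ⟨h1, -⟩ := h; omega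

def ascL (data : List Int) : List Int :=
  (PySem.List.pyRange 0 (data.length : Int) 1).map (fun i => ascSpec data i.toNat)

-- generic list lemmas about guarded flatMaps
theorem flatMap_congr_mem {α β : Type} (l : List α) (f g : α → List β)
    (h : ∀ x ∈ l, f x = g x) : l.flatMap f = l.flatMap g := by
  induction l with
  | nil => rfl
  | cons x xs ih => simp only [List.flatMap_cons]; rw [h x (by simp), ih (fun y hy => h y (by simp [hy]))]

theorem flatMap_filter {α β : Type} (l : List α) (p : α → Bool) (f : α → List β) :
    (l.filter p).flatMap f = l.flatMap (fun x => if p x then f x else []) := by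
  induction l with
  | nil => rfl
  | cons x xs ih =>
    by_cases h : p x <;> simp [h, ih]

theorem flatMap_range_guard {β : Type} (g : Int → List β) (a b hi : Int)
    (hc : b ≤ a ∨ (0 ≤ a ∧ a ≤ b ∧ b ≤ hi)) :
    (PySem.List.pyRange 0 hi 1).flatMap (fun i => if a ≤ i ∧ i < b then g i else [])
    = (PySem.List.pyRange a b 1).flatMap g := by
  rcases hc with hba | ⟨h0, hab, hbh⟩
  · rw [PySem.List.pyRange_one_eq_nil hba, List.flatMap_nil]
    rw [List.flatMap_eq_nil_iff]
    intro x hx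
    split_ifs with h
    · omega
    · rfl
  · rw [PySem.List.pyRange_one_append 0 a hi h0 (by omega),
        PySem.List.pyRange_one_append a b hi hab hbh,
        List.flatMap_append, List.flatMap_append]
    have hl : (PySem.List.pyRange 0 a 1).flatMap (fun i => if a ≤ i ∧ i < b then g i else []) = [] := by
      rw [List.flatMap_eq_nil_iff]; intro x hx
      rw [PySem.List.mem_pyRange_one] at hx
      split_ifs with h
      · omega
      · rfl
    have hr : (PySem.List.pyRange b hi 1).flatMap (fun i => if a ≤ i ∧ i < b then g i else []) = [] := by
      rw [List.flatMap_eq_nil_iff]; intro x hx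
      rw [PySem.List.mem_pyRange_one] at hx
      split_ifs with h
      · omega
      · rfl
    rw [hl, hr, List.nil_append, List.append_nil]
    exact flatMap_congr_mem _ _ _ (fun x hx => by
      rw [PySem.List.mem_pyRange_one] at hx
      rw [if_pos ⟨hx.1, hx.2⟩])

-- A's four loops in flatMap form
theorem foldl_byte22 (data : List Int) (l : List Int) (r : List (String × Int × List Int)) :
    l.foldl (fun acc i =>
      if PySem.List.pyGetD data i 0 = 22 then
        if ((PySem.List.slice data (some (max 0 (i - 4))) (some (i + 5))).all fun b => decide (b < 100)) = true then
          acc ++ [("byte_22", i, PySem.List.slice data (some (max 0 (i - 4))) (some (i + 5)))]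
        else acc
      else acc) r
    = r ++ l.flatMap (gB22 data) := by
  rw [← PySem.List.foldl_append_eq_flatMap]
  apply PySem.List.foldl_congr_mem
  intro acc x _
  simp only [gB22]
  split_ifs <;> simp_all

theorem foldl_byte25 (data : List Int) (l : List Int) (r : List (String × Int × List Int)) :
    l.foldl (fun acc i =>
      if PySem.List.pyGetD data i 0 = 25 then
        if ((PySem.List.slice data (some (max 0 (i - 4))) (some (i + 5))).all fun b => decide (b < 100)) = true then
          acc ++ [("byte_25", i, PySem.List.slice data (some (max 0 (i - 4))) (some (i + 5)))]
        else acc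
      else acc) r
    = r ++ l.flatMap (gB25 data) := by
  rw [← PySem.List.foldl_append_eq_flatMap]
  apply PySem.List.foldl_congr_mem
  intro acc x _
  simp only [gB25]
  split_ifs <;> simp_all

theorem foldl_tab (data : List Int) (l : List Int) (r : List (String × Int × List Int)) :
    l.foldl (fun acc i =>
      if (((PySem.List.slice data (some i) (some (i + 6))).all fun v => decide (10 ≤ v ∧ v ≤ 70)) &&
          decide (PySem.List.slice data (some i) (some (i + 6)) =
                  PySem.List.sorted (PySem.List.slice data (some i) (some (i + 6))) id) &&
          decide (4 ≤ (PySem.Set.ofList (PySem.List.slice data (some i) (some (i + 6))) : List Int).length)) = true then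
        acc ++ [("speed_table", i, PySem.List.slice data (some i) (some (i + 8)))]
      else acc) r
    = r ++ l.flatMap (gTab data) := by
  rw [← PySem.List.foldl_append_eq_flatMap]
  apply PySem.List.foldl_congr_mem
  intro acc x _
  simp only [gTab]
  split_ifs <;> simp

theorem foldl_word (data : List Int) (l : List Int) (r : List (String × Int × List Int)) :
    l.foldl (fun acc i =>
      [(PySem.Int.bor (PySem.List.pyGetD data i 0) (PySem.List.pyGetD data (i + 1) 0 <<< (8 : Nat)), "LE"),
       (PySem.Int.bor (PySem.List.pyGetD data i 0 <<< (8 : Nat)) (PySem.List.pyGetD data (i + 1) 0), "BE")].foldl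
        (fun acc2 p =>
          if p.1 ∈ ([2200, 2500, 3200, 4000, 5000, 2000] : List Int) then
            acc2 ++ [("word_" ++ PySem.Int.toStr p.1 ++ "_" ++ p.2, i,
                      PySem.List.slice data (some (max 0 (i - 2))) (some (i + 4)))]
          else acc2) acc) r
    = r ++ l.flatMap (gWord data) := by
  rw [← PySem.List.foldl_append_eq_flatMap]
  apply PySem.List.foldl_congr_mem
  intro acc x _
  simp only [List.foldl_cons, List.foldl_nil, gWord]
  split_ifs <;> simp_all [List.append_assoc, String.append_assoc]

-- A in canonical form
theorem A_char (data : List Int) (label : String) :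
    find_speed_candidates data label =
      (PySem.List.pyRange 2 ((data.length : Int) - 2) 1).flatMap (gB22 data) ++
      (PySem.List.pyRange 2 ((data.length : Int) - 2) 1).flatMap (gB25 data) ++
      (PySem.List.pyRange 0 ((data.length : Int) - 6) 1).flatMap (gTab data) ++
      (PySem.List.pyRange 0 ((data.length : Int) - 1) 1).flatMap (gWord data) := by
  unfold find_speed_candidates
  dsimp only
  rw [foldl_byte22 data _ _, foldl_byte25 data _ _, foldl_tab data _ _, foldl_word data _ _]
  simp only [List.nil_append]

-- B's position index: the positions stored under value c are exactly the indices holding c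
theorem pos_getD (data : List Int) (c : Int) :
    ((PySem.List.enumerate data).foldl
      (fun (d : PySem.Dict Int (List Int)) p => d.modify p.2 [] (· ++ [p.1])) PySem.Dict.empty).getD c []
    = (PySem.List.pyRange 0 (data.length : Int) 1).filter (fun j => PySem.List.pyGetD data j 0 == c) := by
  have hmap : (PySem.List.enumerate data).foldl
      (fun (d : PySem.Dict Int (List Int)) p => d.modify p.2 [] (· ++ [p.1])) PySem.Dict.empty
      = ((PySem.List.enumerate data).map (fun p => (p.2, p.1))).foldl
      (fun (d : PySem.Dict Int (List Int)) q => d.modify q.1 [] (· ++ [q.2])) PySem.Dict.empty := by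
    rw [List.foldl_map]
  rw [hmap, PySem.Dict.getD_foldl_modify_append, PySem.Dict.getD_empty, List.nil_append,
      List.filter_map, PySem.List.enumerate_eq_map_pyRange data 0]
  simp only [PySem.List.len, List.filter_map, List.map_map]
  simp [Function.comp_def]

-- B's byte loops in flatMap form
theorem foldl_posByte (data : List Int) (n : Int) (name : String) (l : List Int)
    (r : List (String × Int × List Int)) :
    l.foldl (fun acc i =>
      if 2 ≤ i ∧ i < n - 2 then
        if ((PySem.List.slice data (some (max 0 (i - 4))) (some (i + 5))).all fun b => decide (b < 100)) = true then
          acc ++ [(name, i, PySem.List.slice data (some (max 0 (i - 4))) (some (i + 5)))]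
        else acc
      else acc) r
    = r ++ l.flatMap (hByte data n name) := by
  rw [← PySem.List.foldl_append_eq_flatMap]
  apply PySem.List.foldl_congr_mem
  intro acc x _
  simp only [hByte]
  split_ifs <;> simp_all

theorem foldl_tabB (data : List Int) (a : List Int) (l : List Int)
    (r : List (String × Int × List Int)) :
    l.foldl (fun acc i =>
      if 6 ≤ PySem.List.pyGetD a i 0 ∧
         10 ≤ PySem.List.pyGetD (PySem.List.slice data (some i) (some (i + 6))) 0 0 ∧
         PySem.List.pyGetD (PySem.List.slice data (some i) (some (i + 6))) 5 0 ≤ 70 ∧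
         4 ≤ (PySem.Set.ofList (PySem.List.slice data (some i) (some (i + 6))) : List Int).length then
        acc ++ [("speed_table", i, PySem.List.slice data (some i) (some (i + 8)))]
      else acc) r
    = r ++ l.flatMap (hTab data a) := by
  rw [← PySem.List.foldl_append_eq_flatMap]
  apply PySem.List.foldl_congr_mem
  intro acc x _
  simp only [hTab]
  split_ifs <;> simp

-- the backward fold computes ascSpec at every position
theorem ascFold (data : List Int) (m k : Nat) (hm : k + m = data.length) (s0 : Int) :
    ((PySem.List.pyRange (k : Int) (data.length : Int) 1).reverse).foldl
      (fun (st : List Int × Int) i =>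
        (st.1 ++ [if i + 1 < (data.length : Int) ∧
                    PySem.List.pyGetD data i 0 ≤ PySem.List.pyGetD data (i + 1) 0
                  then st.2 + 1 else 1],
         if i + 1 < (data.length : Int) ∧
            PySem.List.pyGetD data i 0 ≤ PySem.List.pyGetD data (i + 1) 0
         then st.2 + 1 else 1)) ([], s0)
    = ((PySem.List.pyRange (k : Int) (data.length : Int) 1).reverse.map (fun i => ascSpec data i.toNat),
       if k < data.length then ascSpec data k else s0) := by
  induction m generalizing k s0 with
  | zero =>
    have hk : ((data.length : Int) : Int) ≤ (k : Int) := by omega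
    rw [PySem.List.pyRange_one_eq_nil hk]
    simp only [List.reverse_nil, List.foldl_nil, List.map_nil]
    rw [if_neg (by omega)]
  | succ m ih =>
    have hlt : (k : Int) < (data.length : Int) := by omega
    have hcast : ((k + 1 : Nat) : Int) = ((k : Int) + 1) := by push_cast; ring
    have hinner := ih (k + 1) (by omega) s0
    rw [hcast] at hinner
    rw [PySem.List.pyRange_one_cons hlt, List.reverse_cons, List.foldl_append, hinner]
    simp only [List.foldl_cons, List.foldl_nil, List.map_append, List.map_cons, List.map_nil,
               Int.toNat_natCast]
    have hrun : ascSpec data k =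
        (if (k : Int) + 1 < (data.length : Int) ∧
            PySem.List.pyGetD data (k : Int) 0 ≤ PySem.List.pyGetD data ((k : Int) + 1) 0
         then (if k + 1 < data.length then ascSpec data (k + 1) else s0) + 1 else 1) := by
      rw [ascSpec]
      by_cases hc : (k : Int) + 1 < (data.length : Int) ∧
          PySem.List.pyGetD data (k : Int) 0 ≤ PySem.List.pyGetD data ((k : Int) + 1) 0
      · have hk1 : k + 1 < data.length := by have h1 := hc.1; omega
        rw [dif_pos hc, if_pos hc, if_pos hk1]
      · rw [dif_neg hc, if_neg hc]
    rw [if_pos (show k < data.length by omega), hrun]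

theorem asc_eq (data : List Int) :
    ((((PySem.List.pyRange 0 (data.length : Int) 1).reverse).foldl
      (fun (st : List Int × Int) i =>
        (st.1 ++ [if i + 1 < (data.length : Int) ∧
                    PySem.List.pyGetD data i 0 ≤ PySem.List.pyGetD data (i + 1) 0
                  then st.2 + 1 else 1],
         if i + 1 < (data.length : Int) ∧
            PySem.List.pyGetD data i 0 ≤ PySem.List.pyGetD data (i + 1) 0
         then st.2 + 1 else 1)) ([], 0)).1).reverse = ascL data := by
  have h0 : ((0 : Nat) : Int) = (0 : Int) := rfl
  have := ascFold data data.length 0 (by omega) 0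
  rw [h0] at this
  rw [this]
  simp only [List.map_reverse, List.reverse_reverse, ascL]

theorem one_le_ascSpec (data : List Int) (k : Nat) : 1 ≤ ascSpec data k := by
  rw [ascSpec]
  split_ifs with h
  · have := one_le_ascSpec data (k + 1); omega
  · omega
termination_by data.length - k
decreasing_by obtain ⟨h1, -⟩ := h; omega

theorem asc_ge_iff (data : List Int) (m k : Nat) (h : k + m < data.length) :
    ((m : Int) + 1 ≤ ascSpec data k ↔
      ∀ j : Nat, j < m →
        PySem.List.pyGetD data ((k : Int) + (j : Int)) 0 ≤
        PySem.List.pyGetD data ((k : Int) + (j : Int) + 1) 0) := by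
  induction m generalizing k with
  | zero =>
    simp only [Nat.cast_zero, zero_add]
    exact ⟨fun _ j hj => absurd hj (by omega), fun _ => one_le_ascSpec data k⟩
  | succ m ih =>
    have hk1 : (k : Int) + 1 < (data.length : Int) := by omega
    rw [ascSpec]
    by_cases hc : PySem.List.pyGetD data (k : Int) 0 ≤ PySem.List.pyGetD data ((k : Int) + 1) 0
    · rw [dif_pos ⟨hk1, hc⟩]
      have hih := ih (k + 1) (by omega)
      constructor
      · intro hge j hj
        rcases j with _ | j
        · simpa using hc
        · have hj' : j < m := by omega
          have := (hih.mp (by push_cast at hge ⊢; omega)) j hj'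
          have hidx : ((k + 1 : Nat) : Int) + (j : Int) = (k : Int) + ((j + 1 : Nat) : Int) := by
            push_cast; ring
          rw [hidx] at this
          convert this using 3
      · intro hall
        have : (m : Int) + 1 ≤ ascSpec data (k + 1) := by
          apply hih.mpr
          intro j hj
          have := hall (j + 1) (by omega)
          have hidx : ((k + 1 : Nat) : Int) + (j : Int) = (k : Int) + ((j + 1 : Nat) : Int) := by
            push_cast; ring
          rw [hidx]
          convert this using 3
        push_cast
        omega
    · rw [dif_neg (by tauto)]
      constructor
      · intro hge; exfalso; push_cast at hge; omega
      · intro hall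
        exact absurd (by simpa using hall 0 (by omega)) hc

-- window elements of the slice as pyGetD of data
theorem win_len (data : List Int) (i : Int) (h0 : 0 ≤ i) (h6 : i < (data.length : Int) - 6) :
    (PySem.List.slice data (some i) (some (i + 6))).length = 6 := by
  rw [PySem.List.slice_toNat data h0 (by omega : (0:Int) ≤ i + 6)]
  simp only [List.length_take, List.length_drop]
  omega

theorem win_elem (data : List Int) (i : Int) (h0 : 0 ≤ i) (h6 : i < (data.length : Int) - 6)
    (j : Nat) (hj : j < 6) :
    PySem.List.pyGetD (PySem.List.slice data (some i) (some (i + 6))) (j : Int) 0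
    = PySem.List.pyGetD data (i + (j : Int)) 0 := by
  rw [PySem.List.slice_toNat data h0 (by omega : (0:Int) ≤ i + 6)]
  rw [PySem.List.pyGetD_of_nonneg _ _ (by omega : (0:Int) ≤ (j:Int)),
      PySem.List.pyGetD_of_nonneg _ _ (by omega : (0:Int) ≤ i + (j:Int))]
  have h1 : ((j : Int)).toNat = j := by omega
  have h2 : (i + (j : Int)).toNat = i.toNat + j := by omega
  rw [h1, h2]
  have hlt : j < ((i + 6).toNat - i.toNat) := by omega
  have hlt2 : i.toNat + j < data.length := by omega
  rw [List.getD_eq_getElem _ _ (by simp; omega), List.getD_eq_getElem _ _ (by omega)]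
  rw [List.getElem_take, List.getElem_drop]

-- the table condition of B equals A's per window
theorem tab_cond (data : List Int) (i : Int) (h0 : 0 ≤ i) (h6 : i < (data.length : Int) - 6) :
    (6 ≤ PySem.List.pyGetD (ascL data) i 0 ∧
     10 ≤ PySem.List.pyGetD (PySem.List.slice data (some i) (some (i + 6))) 0 0 ∧
     PySem.List.pyGetD (PySem.List.slice data (some i) (some (i + 6))) 5 0 ≤ 70 ∧
     4 ≤ (PySem.Set.ofList (PySem.List.slice data (some i) (some (i + 6))) : List Int).length)
    ↔ ((((PySem.List.slice data (some i) (some (i + 6))).all fun v => decide (10 ≤ v ∧ v ≤ 70)) &&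
        decide (PySem.List.slice data (some i) (some (i + 6)) =
                PySem.List.sorted (PySem.List.slice data (some i) (some (i + 6))) id) &&
        decide (4 ≤ (PySem.Set.ofList (PySem.List.slice data (some i) (some (i + 6))) : List Int).length)) = true) := by
  have hlen := win_len data i h0 h6
  have hasc : PySem.List.pyGetD (ascL data) i 0 = ascSpec data i.toNat := by
    unfold ascL
    have : i = ((i.toNat : Nat) : Int) := by omega
    rw [this, PySem.List.pyGetD_map_pyRange _ _ _ _ (by omega : i.toNat < data.length)]
  have hti : ((i.toNat : Nat) : Int) = i := by omega
  have hchain : (6 : Int) ≤ ascSpec data i.toNat ↔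
      ∀ j : Nat, j < 5 →
        PySem.List.pyGetD data (i + (j : Int)) 0 ≤
        PySem.List.pyGetD data (i + (j : Int) + 1) 0 := by
    have h5 := asc_ge_iff data 5 i.toNat (by omega)
    rw [hti] at h5
    constructor
    · intro hx; exact h5.mp (by push_cast; omega)
    · intro hx; have := h5.mpr hx; push_cast at this; omega
  have hel : ∀ j : Nat, j < 6 →
      PySem.List.pyGetD data (i + (j : Int)) 0
      = PySem.List.pyGetD (PySem.List.slice data (some i) (some (i + 6))) (j : Int) 0 :=
    fun j hj => (win_elem data i h0 h6 j hj).symm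
  rw [hasc, hchain]
  have hch2 : (∀ j : Nat, j < 5 →
      PySem.List.pyGetD data (i + (j : Int)) 0 ≤ PySem.List.pyGetD data (i + (j : Int) + 1) 0)
      ↔ (∀ j : Nat, j < 5 →
      PySem.List.pyGetD (PySem.List.slice data (some i) (some (i + 6))) (j : Int) 0 ≤
      PySem.List.pyGetD (PySem.List.slice data (some i) (some (i + 6))) ((j + 1 : Nat) : Int) 0) := by
    have hstep : ∀ j : Nat, j < 5 →
        (PySem.List.pyGetD data (i + (j : Int)) 0 ≤ PySem.List.pyGetD data (i + (j : Int) + 1) 0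
         ↔ PySem.List.pyGetD (PySem.List.slice data (some i) (some (i + 6))) (j : Int) 0 ≤
           PySem.List.pyGetD (PySem.List.slice data (some i) (some (i + 6))) ((j + 1 : Nat) : Int) 0) := by
      intro j hj
      rw [← hel j (by omega), ← hel (j + 1) (by omega)]
      have : i + ((j + 1 : Nat) : Int) = i + (j : Int) + 1 := by push_cast; ring
      rw [this]
    exact ⟨fun hx j hj => (hstep j hj).mp (hx j hj), fun hx j hj => (hstep j hj).mpr (hx j hj)⟩
  rw [hch2]
  clear hel hch2 hchain hasc
  generalize hsl : PySem.List.slice data (some i) (some (i + 6)) = w at hlen ⊢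
  obtain ⟨a, b, c, d, e, f, rfl⟩ : ∃ a b c d e f, w = [a, b, c, d, e, f] := by
    rcases w with _ | ⟨a, _ | ⟨b, _ | ⟨c, _ | ⟨d, _ | ⟨e, _ | ⟨f, _ | ⟨g, t⟩⟩⟩⟩⟩⟩⟩
    all_goals first
      | exact ⟨_, _, _, _, _, _, rfl⟩
      | (exfalso; simp at hlen)
  have hchain2 : (∀ j : Nat, j < 5 →
      PySem.List.pyGetD [a, b, c, d, e, f] (j : Int) 0 ≤
      PySem.List.pyGetD [a, b, c, d, e, f] ((j + 1 : Nat) : Int) 0)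
      ↔ (a ≤ b ∧ b ≤ c ∧ c ≤ d ∧ d ≤ e ∧ e ≤ f) := by
    constructor
    · intro hx
      refine ⟨?_, ?_, ?_, ?_, ?_⟩ <;>
        [have := hx 0 (by omega);
         have := hx 1 (by omega);
         have := hx 2 (by omega);
         have := hx 3 (by omega);
         have := hx 4 (by omega)] <;>
        (push_cast at this; simpa [PySem.List.pyGetD_ofNat', List.getD] using this)
    · intro hx j hj
      interval_cases j <;> push_cast <;> simp [PySem.List.pyGetD_ofNat', List.getD] <;> tauto
  rw [hchain2]
  simp only [PySem.List.pyGetD_ofNat', List.getD]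
  by_cases hch : a ≤ b ∧ b ≤ c ∧ c ≤ d ∧ d ≤ e ∧ e ≤ f
  · have hs : PySem.List.sorted [a, b, c, d, e, f] id = [a, b, c, d, e, f] :=
      PySem.List.sorted_eq_self_of_pairwise _ _ (by simp [List.pairwise_cons]; omega)
    by_cases hS : 4 ≤ (PySem.Set.ofList [a, b, c, d, e, f] : List Int).length
    · simp [hch, hs, hS, Bool.and_eq_true, decide_eq_true_eq]
      omega
    · simp [hch, hS]
  · have hns : ¬ ([a, b, c, d, e, f] = PySem.List.sorted [a, b, c, d, e, f] id) := by
      intro h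
      have hp := PySem.List.sorted_pairwise [a, b, c, d, e, f] (id : Int → Int)
      rw [← h] at hp
      simp [List.pairwise_cons] at hp
      exact hch ⟨by omega, by omega, by omega, by omega, by omega⟩
    simp [hch, hns]

-- B in canonical form
theorem B_char (data : List Int) (label : String) :
    find_speed_candidates_alt data label =
      ((PySem.List.pyRange 0 (data.length : Int) 1).filter
        (fun j => PySem.List.pyGetD data j 0 == 22)).flatMap (hByte data (data.length : Int) "byte_22") ++
      ((PySem.List.pyRange 0 (data.length : Int) 1).filter
        (fun j => PySem.List.pyGetD data j 0 == 25)).flatMap (hByte data (data.length : Int) "byte_25") ++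
      (PySem.List.pyRange 0 ((data.length : Int) - 6) 1).flatMap (hTab data (ascL data)) ++
      (PySem.List.pyRange 0 ((data.length : Int) - 1) 1).flatMap (gWord data) := by
  unfold find_speed_candidates_alt
  dsimp only
  rw [foldl_word data _ _, foldl_tabB data _ _ _, asc_eq data]
  simp only [List.foldl_cons, List.foldl_nil]
  rw [pos_getD data 22, pos_getD data 25]
  rw [foldl_posByte data _ "byte_22" _ _, foldl_posByte data _ "byte_25" _ _]
  simp only [List.nil_append, List.append_assoc]

-- the three buckets agree
theorem bucket_byte22 (data : List Int) :
    ((PySem.List.pyRange 0 (data.length : Int) 1).filter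
      (fun j => PySem.List.pyGetD data j 0 == 22)).flatMap (hByte data (data.length : Int) "byte_22")
    = (PySem.List.pyRange 2 ((data.length : Int) - 2) 1).flatMap (gB22 data) := by
  rw [flatMap_filter,
      ← flatMap_range_guard (gB22 data) 2 ((data.length : Int) - 2) (data.length : Int) (by omega)]
  apply flatMap_congr_mem
  intro x _
  simp only [hByte, gB22, beq_iff_eq]
  split_ifs <;> simp_all

theorem bucket_byte25 (data : List Int) :
    ((PySem.List.pyRange 0 (data.length : Int) 1).filter
      (fun j => PySem.List.pyGetD data j 0 == 25)).flatMap (hByte data (data.length : Int) "byte_25")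
    = (PySem.List.pyRange 2 ((data.length : Int) - 2) 1).flatMap (gB25 data) := by
  rw [flatMap_filter,
      ← flatMap_range_guard (gB25 data) 2 ((data.length : Int) - 2) (data.length : Int) (by omega)]
  apply flatMap_congr_mem
  intro x _
  simp only [hByte, gB25, beq_iff_eq]
  split_ifs <;> simp_all

theorem bucket_tab (data : List Int) :
    (PySem.List.pyRange 0 ((data.length : Int) - 6) 1).flatMap (hTab data (ascL data))
    = (PySem.List.pyRange 0 ((data.length : Int) - 6) 1).flatMap (gTab data) := by
  apply flatMap_congr_mem
  intro x hx
  rw [PySem.List.mem_pyRange_one] at hx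
  simp only [hTab, gTab]
  rw [if_congr (tab_cond data x hx.1 (by omega)) rfl rfl]

-- ===== VERDICT (by name: the statement is the Claim_ definition above) =====
theorem find_speed_candidates_spec : Claim_equal_find_speed_candidates := by
  intro data label _
  show find_speed_candidates data label = find_speed_candidates_alt data label
  rw [A_char data label, B_char data label, bucket_byte22, bucket_byte25, bucket_tab]
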